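-- pv_equiv track=rewrite | github.com/filintod/pyremotelogin | fdutils/lists.py | del_from_list_by_index
-- ===== SOURCE A (Python) =====
-- def del_from_list_by_index(original_list, indexes, count=0):
--     """ general private utility removes elements from the list x if elements exists or if the lambda function is true
--
--     :param list original_list: list where we would remove the elements from
--     :param list or None indexes: list of element to find in l and remove
--     :param int count: number of times to remove elements. Remove all if value is 0.
--                             This function does not keep a counter for every element in elements, so this counter is for
--                             all removals. We'll add the functionality If we see a need to have it
--
--     :rtype: int
--     :return: number of elements removed
--
--     """
--
--     j = 0
--     remove_counter = 0
--     if not original_list or not indexes: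
--         return 0
--
--     for i, v in enumerate(original_list):
--         if remove_counter < count and i in indexes:
--             remove_counter += 1
--         else:
--             original_list[j] = v
--             j += 1
--
--     del original_list[j:]
--     return remove_counter
-- ===== SOURCE B (Python) =====
-- def del_from_list_by_index(original_list, indexes, count=0):
--     if not original_list or not indexes:
--         return 0
--     matched = [i for i in range(len(original_list)) if i in indexes]
--     removed = max(0, min(len(matched), count))
--     for i in reversed(matched[:removed]):
--         del original_list[i]
--     return removed
-- ===== Notes on version B (the rewrite author's own statement) =====
-- stated objective: alternative
-- what changed: Replaces A's stateful compaction loop (overwrite-slot, counter, truncate) with a declarative pipeline: list all matching positions once, clamp the removal count with max/min arithmetic instead of a loop condition, and delete that prefix in reverse.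
import Mathlib
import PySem

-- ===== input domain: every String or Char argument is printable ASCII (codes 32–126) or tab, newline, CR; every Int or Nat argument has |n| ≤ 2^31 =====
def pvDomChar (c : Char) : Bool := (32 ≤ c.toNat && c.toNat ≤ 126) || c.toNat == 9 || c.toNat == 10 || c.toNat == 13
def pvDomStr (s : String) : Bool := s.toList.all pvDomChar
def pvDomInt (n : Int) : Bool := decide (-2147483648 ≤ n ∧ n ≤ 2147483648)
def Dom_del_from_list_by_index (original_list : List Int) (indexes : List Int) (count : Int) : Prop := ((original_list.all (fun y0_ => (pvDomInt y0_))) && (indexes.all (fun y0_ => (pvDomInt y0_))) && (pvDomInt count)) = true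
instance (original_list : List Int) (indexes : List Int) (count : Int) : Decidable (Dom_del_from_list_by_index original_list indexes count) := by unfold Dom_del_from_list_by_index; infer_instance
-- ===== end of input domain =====

-- B replaces A's stateful compaction loop (overwrite slot + counter + truncate) by a declarative
-- pipeline: collect all matching positions, clamp with max/min arithmetic, delete that prefix in
-- reverse. Both Pythons mutate original_list identically (the same positions are removed); the
-- theorem proved here is about the return value.

-- ===== PORT A =====
-- loop over enumerate(original_list): state is (j, remove_counter); the writes original_list[j] = v
-- do not affect the returned counter, so j is carried as dead state and the write is dropped.
def pvALoop (indexes : List Int) (count : Int) : List Int → Int → Int → Int → Int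
  | [], _, _, rc => rc
  | _ :: rest, i, j, rc =>
    if rc < count ∧ i ∈ indexes then pvALoop indexes count rest (i + 1) j (rc + 1)
    else pvALoop indexes count rest (i + 1) (j + 1) rc

def del_from_list_by_index (original_list : List Int) (indexes : List Int) (count : Int) : Int :=
  if original_list = [] ∨ indexes = [] then 0
  else pvALoop indexes count original_list 0 0 0

-- ===== PORT B =====
-- matched = [i for i in range(len(l)) if i in indexes]; removed = max(0, min(len(matched), count))
def del_from_list_by_index_alt (original_list : List Int) (indexes : List Int) (count : Int) : Int :=
  if original_list = [] ∨ indexes = [] then 0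
  else
    let matched := (PySem.List.pyRange 0 (original_list.length : Int) 1).filter
      (fun i => decide (i ∈ indexes))
    max 0 (min (matched.length : Int) count)

-- ===== PRECONDITION & SPEC =====
def Spec_del_from_list_by_index (original_list : List Int) (indexes : List Int) (count : Int) (out : Int) : Prop := out = del_from_list_by_index_alt original_list indexes count
instance (original_list : List Int) (indexes : List Int) (count : Int) (out : Int) : Decidable (Spec_del_from_list_by_index original_list indexes count out) := by unfold Spec_del_from_list_by_index; infer_instance

-- ===== CLAIM (what is proved, stated in full; the proofs are below) =====
def Claim_equal_del_from_list_by_index : Prop := ∀ (original_list : List Int) (indexes : List Int) (count : Int), Dom_del_from_list_by_index original_list indexes count → Spec_del_from_list_by_index original_list indexes count (del_from_list_by_index original_list indexes count)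

-- ===== LEMMAS AND PROOFS =====

-- number of matching enumeration indices over `rest` when the first element has index i
def pvMatchCount (indexes : List Int) : List Int → Int → Int
  | [], _ => 0
  | _ :: rest, i => (if i ∈ indexes then 1 else 0) + pvMatchCount indexes rest (i + 1)

lemma pvMatchCount_nonneg (indexes rest : List Int) (i : Int) :
    0 ≤ pvMatchCount indexes rest i := by
  induction rest generalizing i with
  | nil => simp [pvMatchCount]
  | cons v rest ih =>
      have := ih (i + 1)
      simp only [pvMatchCount]
      split <;> omega

-- A's loop computes the clamp of the match count
lemma pvALoop_eq (indexes : List Int) (count : Int) (rest : List Int) (i j rc : Int) :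
    pvALoop indexes count rest i j rc
      = max rc (min (rc + pvMatchCount indexes rest i) count) := by
  induction rest generalizing i j rc with
  | nil => simp [pvALoop, pvMatchCount]
  | cons v rest ih =>
      have hnn := pvMatchCount_nonneg indexes rest (i + 1)
      by_cases hc : rc < count
      · by_cases hm : i ∈ indexes
        · simp only [pvALoop, if_pos (⟨hc, hm⟩ : rc < count ∧ i ∈ indexes),
            pvMatchCount, if_pos hm, ih]
          omega
        · simp only [pvALoop, if_neg (by tauto : ¬ (rc < count ∧ i ∈ indexes)),
            pvMatchCount, if_neg hm, ih]
          omega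
      · simp only [pvALoop, if_neg (by tauto : ¬ (rc < count ∧ i ∈ indexes)),
          pvMatchCount, ih]
        split <;> omega

-- the filtered range has as many elements as pvMatchCount counts
lemma pvFilter_eq_matchCount (indexes rest : List Int) (i : Int) :
    (((PySem.List.pyRange i (i + (rest.length : Int)) 1).filter
        (fun k => decide (k ∈ indexes))).length : Int)
      = pvMatchCount indexes rest i := by
  induction rest generalizing i with
  | nil => simp [PySem.List.pyRange_one_eq_nil, pvMatchCount]
  | cons v rest ih =>
      have hlt : i < i + ((v :: rest).length : Int) := by simp
      rw [PySem.List.pyRange_one_cons hlt]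
      have : i + ((v :: rest).length : Int) = (i + 1) + ((rest.length : Int)) := by
        simp; omega
      rw [this]
      simp only [List.filter_cons, pvMatchCount]
      by_cases hm : i ∈ indexes
      · simp [hm, ← ih (i + 1)]; omega
      · simp [hm, ← ih (i + 1)]

-- ===== VERDICT =====
theorem del_from_list_by_index_spec : Claim_equal_del_from_list_by_index := by
  intro l idx c _
  unfold Spec_del_from_list_by_index del_from_list_by_index del_from_list_by_index_alt
  split
  · rfl
  · have h := pvFilter_eq_matchCount idx l 0
    simp only [zero_add] at h
    rw [pvALoop_eq, zero_add, ← h]
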